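-- pv_equiv track=rewrite | github.com/timryadovouu/course_python_stepik | 02_repeat/part_1.py | filter_anagrams
-- ===== SOURCE A (Python) =====
-- def filter_anagrams(word, words):                  #1_6
--     answer = []
--     new_words = [''.join(sorted(list(i))) for i in words]
--     word_massive = ''.join(sorted(list(word)))
--     for i in range(len(new_words)):
--         if new_words[i] == word_massive:
--             answer.append(words[i])
--     return answer
-- ===== SOURCE B (Python) =====
-- def filter_anagrams(word, words):
--     # compare letter-frequency maps instead of sorted canonical forms
--     def counts(s):
--         d = {}
--         for c in s:
--             d[c] = d.get(c, 0) + 1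
--         return d
--     target = counts(word)
--     return [w for w in words if counts(w) == target]
-- ===== Notes on version B (the rewrite author's own statement) =====
-- stated objective: alternative
-- what changed: Replaces A's per-word canonicalization by sorting (sort each word, join, compare strings in an index loop) with a letter-frequency dictionary built for the target and compared per word in a comprehension.
import Mathlib
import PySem

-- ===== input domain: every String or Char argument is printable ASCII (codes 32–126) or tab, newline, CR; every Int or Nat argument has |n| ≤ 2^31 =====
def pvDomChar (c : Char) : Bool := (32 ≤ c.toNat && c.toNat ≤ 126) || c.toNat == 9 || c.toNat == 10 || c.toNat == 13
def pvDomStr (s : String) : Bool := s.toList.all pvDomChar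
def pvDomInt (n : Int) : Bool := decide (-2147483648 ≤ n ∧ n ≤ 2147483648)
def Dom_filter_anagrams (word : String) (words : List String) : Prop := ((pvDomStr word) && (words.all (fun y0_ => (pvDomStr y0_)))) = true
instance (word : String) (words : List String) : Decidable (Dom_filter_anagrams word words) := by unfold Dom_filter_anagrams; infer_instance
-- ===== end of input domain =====

-- B replaces A's sort-join-and-index-loop canonicalization with a letter-frequency
-- dictionary comparison (alternative algorithm, same results).


-- ===== PORT A =====
-- ''.join(sorted(list(s))) is kept as its sorted char list; '==' on the joined
-- strings is exactly '=' on those char lists (join of chars is injective).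
def pySortChars (s : String) : List Char := PySem.List.sorted s.toList (fun x => x) false

def filter_anagrams (word : String) (words : List String) : List String :=
  let new_words := words.map pySortChars
  let word_massive := pySortChars word
  (PySem.List.pyRange 0 (new_words.length : Int) 1).foldl
    (fun answer i =>
      if PySem.List.pyGetD new_words i (pySortChars "") = word_massive then
        answer ++ [PySem.List.pyGetD words i ""]
      else answer) []

-- ===== PORT B =====
-- d[c] = d.get(c, 0) + 1 over the characters of s
def pyCounts (s : String) : PySem.Dict Char Int :=
  s.toList.foldl (fun d c => d.insert c (d.getD c 0 + 1)) PySem.Dict.empty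

-- Python's dict '==' (order-insensitive): same key set and the same value at each
-- key; exact here since a Dict's keys are distinct.
def pyDictEq (d1 d2 : PySem.Dict Char Int) : Bool :=
  PySem.Set.equal d1.keys d2.keys && d1.keys.all (fun k => d1.getD k 0 == d2.getD k 0)

def filter_anagrams_alt (word : String) (words : List String) : List String :=
  let target := pyCounts word
  words.filter (fun w => pyDictEq (pyCounts w) target)

-- ===== PRECONDITION & SPEC =====
def Spec_filter_anagrams (word : String) (words : List String) (out : List String) : Prop := out = filter_anagrams_alt word words
instance (word : String) (words : List String) (out : List String) : Decidable (Spec_filter_anagrams word words out) := by unfold Spec_filter_anagrams; infer_instance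

-- ===== CLAIM (what is proved, stated in full; the proofs are below) =====
def Claim_equal_filter_anagrams : Prop := ∀ (word : String) (words : List String), Dom_filter_anagrams word words → Spec_filter_anagrams word words (filter_anagrams word words)

-- ===== LEMMAS AND PROOFS =====

-- counter equality (as Python's dict ==) is exactly permutation of the char lists
theorem pyDictEq_counter_iff (xs ys : List Char) :
    pyDictEq (PySem.Dict.counter xs) (PySem.Dict.counter ys) = true ↔ xs.Perm ys := by
  simp only [pyDictEq, Bool.and_eq_true, PySem.Set.equal_iff, PySem.Dict.keys_counter,
    PySem.Set.mem_ofList, List.all_eq_true, PySem.Dict.getD_counter, beq_iff_eq,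
    Nat.cast_inj, List.perm_iff_count]
  constructor
  · rintro ⟨hmem, hcnt⟩ c
    by_cases hc : c ∈ xs
    · exact hcnt c hc
    · have hc' : c ∉ ys := fun h => hc ((hmem c).mpr h)
      simp [List.count_eq_zero_of_not_mem hc, List.count_eq_zero_of_not_mem hc']
  · intro h
    refine ⟨fun c => ?_, fun c _ => h c⟩
    constructor <;> intro hm <;>
      [exact List.count_pos_iff.mp (by rw [← h c]; exact List.count_pos_iff.mpr hm);
       exact List.count_pos_iff.mp (by rw [h c]; exact List.count_pos_iff.mpr hm)]

theorem pyCounts_eq_counter (s : String) : pyCounts s = PySem.Dict.counter s.toList :=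
  PySem.Dict.foldl_insert_getD_add_one_eq_counter s.toList

-- A's index loop is a filter by sorted-canonical-form equality
theorem loopA_eq_filter (word : String) (words : List String) :
    filter_anagrams word words
      = words.filter (fun w => decide (pySortChars w = pySortChars word)) := by
  show (PySem.List.pyRange 0 ((words.map pySortChars).length : Int) 1).foldl
      (fun answer i =>
        if PySem.List.pyGetD (words.map pySortChars) i (pySortChars "") = pySortChars word then
          answer ++ [PySem.List.pyGetD words i ""]
        else answer) [] = _
  simp only [PySem.List.pyGetD_map, List.length_map]
  rw [PySem.List.foldl_pyRange_zero_pyGetD' words ""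
      (fun answer w => if pySortChars w = pySortChars word then answer ++ [w] else answer) []]
  rw [PySem.List.foldl_append_ite_eq_filter (fun w => pySortChars w = pySortChars word)]
  exact List.nil_append _

-- ===== VERDICT (by name: the statement is the Claim_ definition above) =====
theorem filter_anagrams_spec : Claim_equal_filter_anagrams := by
  intro word words _
  show filter_anagrams word words = filter_anagrams_alt word words
  rw [loopA_eq_filter]
  show _ = words.filter (fun w => pyDictEq (pyCounts w) (pyCounts word))
  refine List.filter_congr (fun w _ => ?_)
  rw [pyCounts_eq_counter, pyCounts_eq_counter]
  have : (pySortChars w = pySortChars word) ↔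
      pyDictEq (PySem.Dict.counter w.toList) (PySem.Dict.counter word.toList) = true :=
    (PySem.List.sorted_id_eq_sorted_id_iff_perm w.toList word.toList).trans
      (pyDictEq_counter_iff w.toList word.toList).symm
  rw [Bool.eq_iff_iff, decide_eq_true_iff]
  exact this
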